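-- pv_equiv track=rewrite | github.com/collinsakenga/codewars_solutions | 6 kyu/String reduction.py | solve
-- ===== SOURCE A (Python) =====
-- from collections import Counter
--
-- def solve(a,b):
--     if len(b)>len(a):
--         return 0
--     count1=Counter(a)
--     count2=Counter(b)
--     total=0
--     for i,j in count2.items():
--         if not count1.get(i, 0):
--             return 0
--         elif j>count1.get(i, 0):
--             return 0
--         total+=j
--     return len(a)-total
-- ===== SOURCE B (Python) =====
-- def solve(a, b):
--     sa = sorted(a)
--     sb = sorted(b)
--     i = 0
--     for c in sb:
--         while i < len(sa) and sa[i] < c: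
--             i += 1
--         if i >= len(sa) or sa[i] != c:
--             return 0
--         i += 1
--     return len(a) - len(b)
-- ===== Notes on version B (the rewrite author's own statement) =====
-- stated objective: alternative
-- what changed: Replaces the two Counter tables and the per-key count comparison loop with sorting both strings and a single two-pointer merge that checks multiset containment character by character.
import Mathlib
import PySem

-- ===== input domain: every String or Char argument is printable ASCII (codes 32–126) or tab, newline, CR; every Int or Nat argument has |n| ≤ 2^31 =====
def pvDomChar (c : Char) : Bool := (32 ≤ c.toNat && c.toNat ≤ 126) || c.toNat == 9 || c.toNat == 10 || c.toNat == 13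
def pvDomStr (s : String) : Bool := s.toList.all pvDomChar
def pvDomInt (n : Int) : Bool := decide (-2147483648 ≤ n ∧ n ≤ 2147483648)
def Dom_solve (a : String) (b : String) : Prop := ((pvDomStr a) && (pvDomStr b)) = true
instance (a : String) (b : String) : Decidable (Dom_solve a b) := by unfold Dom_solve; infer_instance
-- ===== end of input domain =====

-- B sorts both strings and checks multiset containment by a two-pointer merge
-- instead of A's two Counter tables; return value proved equal on all inputs (alternative, not claimed faster).

-- ===== PORT A =====
-- the 'for i,j in count2.items()' loop with its two early 'return 0' branches
def solveLoop (count1 : PySem.Dict Char Int) (lenA : Int) : List (Char × Int) → Int → Int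
  | [], total => lenA - total
  | (i, j) :: rest, total =>
    if count1.getD i 0 = 0 then 0
    else if j > count1.getD i 0 then 0
    else solveLoop count1 lenA rest (total + j)

def solve (a : String) (b : String) : Int :=
  if PySem.Str.len b > PySem.Str.len a then 0
  else solveLoop (PySem.Dict.counter a.toList) (PySem.Str.len a)
         (PySem.Dict.counter b.toList).items 0

-- ===== PORT B =====
-- the 'for c in sb' loop over sorted b with pointer i into sorted a:
-- the while-advance consumes the head of the remaining sorted-a list
def chk : List Char → List Char → Bool
  | _, [] => true
  | [], _ :: _ => false
  | x :: xs, c :: cs =>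
    if x < c then chk xs (c :: cs)
    else if x = c then chk xs cs
    else false

def solve_alt (a : String) (b : String) : Int :=
  if chk (PySem.List.sorted a.toList (fun c => c) false)
         (PySem.List.sorted b.toList (fun c => c) false)
  then PySem.Str.len a - PySem.Str.len b else 0

-- ===== PRECONDITION & SPEC =====
def Spec_solve (a : String) (b : String) (out : Int) : Prop := out = solve_alt a b
instance (a : String) (b : String) (out : Int) : Decidable (Spec_solve a b out) := by unfold Spec_solve; infer_instance

-- ===== CLAIM (what is proved, stated in full; the proofs are below) =====
def Claim_equal_solve : Prop := ∀ (a : String) (b : String), Dom_solve a b → Spec_solve a b (solve a b)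

-- ===== LEMMAS AND PROOFS =====

-- B side: on ≤-sorted lists, chk decides multiset containment
lemma chk_iff (la lb : List Char) (ha : la.Pairwise (· ≤ ·)) (hb : lb.Pairwise (· ≤ ·)) :
    chk la lb = true ↔ (lb : Multiset Char) ≤ (la : Multiset Char) := by
  induction la generalizing lb with
  | nil =>
      cases lb with
      | nil => simp [chk]
      | cons c cs => simp [chk]
  | cons x xs ih =>
      cases lb with
      | nil => simp [chk]
      | cons c cs =>
          have hxs := (List.pairwise_cons.mp ha).2
          have hcs := (List.pairwise_cons.mp hb).2
          by_cases hlt : x < c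
          · rw [chk, if_pos hlt, ih (c :: cs) hxs hb]
            constructor
            · intro h
              exact h.trans (by
                rw [← Multiset.cons_coe]
                exact Multiset.le_cons_self (xs : Multiset Char) x)
            · intro h
              rw [Multiset.le_iff_count] at h ⊢
              intro d
              rw [Multiset.coe_count, Multiset.coe_count]
              by_cases hd : d = x
              · subst hd
                have h0 : (c :: cs).count d = 0 := by
                  rw [List.count_eq_zero]
                  intro hmem
                  rcases List.mem_cons.mp hmem with h' | h'
                  · exact absurd h'.symm (ne_of_gt hlt)
                  · have := (List.pairwise_cons.mp hb).1 d h'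
                    exact absurd (lt_of_lt_of_le hlt this) (lt_irrefl d)
                simp [h0]
              · have hdx : x ≠ d := fun e => hd e.symm
                have := h d
                rw [Multiset.coe_count, Multiset.coe_count] at this
                simpa [List.count_cons, hdx] using this
          · rw [chk, if_neg hlt]
            by_cases heq : x = c
            · subst heq
              rw [if_pos rfl, ih cs hxs hcs]
              constructor
              · intro h
                rw [← Multiset.cons_coe, ← Multiset.cons_coe]
                exact Multiset.cons_le_cons x h
              · intro h
                rw [← Multiset.cons_coe, ← Multiset.cons_coe] at h
                exact (Multiset.cons_le_cons_iff x).mp h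
            · rw [if_neg heq]
              simp only [Bool.false_eq_true, false_iff]
              intro h
              have hgt : c < x := lt_of_le_of_ne (le_of_not_gt hlt) (fun e => heq e.symm)
              rw [Multiset.le_iff_count] at h
              have hc := h c
              rw [Multiset.coe_count, Multiset.coe_count] at hc
              have h0 : (x :: xs).count c = 0 := by
                rw [List.count_eq_zero]
                intro hmem
                rcases List.mem_cons.mp hmem with h' | h'
                · exact absurd h'.symm (ne_of_gt hgt)
                · have := (List.pairwise_cons.mp ha).1 c h'
                  exact absurd (lt_of_lt_of_le hgt this) (lt_irrefl c)
              rw [h0, List.count_cons_self] at hc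
              omega

-- A side: the loop over counter-items computes the same containment test
lemma solveLoop_spec (la lb : List Char) (ks : List Char) (total lenA : Int)
    (hk : ∀ k ∈ ks, 1 ≤ lb.count k) :
    solveLoop (PySem.Dict.counter la) lenA (ks.map (fun k => (k, (lb.count k : Int)))) total
      = if ∀ k ∈ ks, lb.count k ≤ la.count k
        then lenA - (total + ((ks.map (fun k => (lb.count k : Int))).sum))
        else 0 := by
  induction ks generalizing total with
  | nil => simp [solveLoop]
  | cons k ks ih =>
      simp only [List.map_cons, solveLoop, PySem.Dict.getD_counter]
      by_cases h0 : (la.count k : Int) = 0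
      · rw [if_pos h0]
        have hx : ¬ (lb.count k ≤ la.count k) := by
          have := hk k (by simp)
          omega
        rw [if_neg (by intro h; exact hx (h k (by simp)))]
      · rw [if_neg h0]
        by_cases hj : (lb.count k : Int) > (la.count k : Int)
        · rw [if_pos hj]
          rw [if_neg (by intro h; have := h k (by simp); omega)]
        · rw [if_neg hj]
          rw [ih (total + lb.count k) (fun x hx => hk x (by simp [hx]))]
          by_cases hall : ∀ x ∈ ks, lb.count x ≤ la.count x
          · rw [if_pos hall, if_pos]
            · simp only [List.sum_cons]; ring
            · intro x hx
              rcases List.mem_cons.mp hx with rfl | hx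
              · omega
              · exact hall x hx
          · rw [if_neg hall, if_neg]
            intro h
            exact hall (fun x hx => h x (by simp [hx]))

-- sum of counts over the distinct elements is the length
lemma sum_counts (lb : List Char) :
    (((PySem.Set.ofList lb : List Char).map (fun k => (lb.count k : Int))).sum) = lb.length := by
  have hnd : (PySem.Set.ofList lb : List Char).Nodup := PySem.Set.nodup_ofList lb
  rw [Finset.sum_list_map_count]
  have hts : (PySem.Set.ofList lb : List Char).toFinset = lb.toFinset := by
    ext x; simp [PySem.Set.mem_ofList]
  rw [hts]
  rw [Finset.sum_congr rfl (fun m hm => by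
    have hmem : m ∈ (PySem.Set.ofList lb : List Char) := by
      rw [PySem.Set.mem_ofList]; exact List.mem_toFinset.mp hm
    rw [List.count_eq_one_of_mem hnd hmem, one_smul])]
  rw [← Nat.cast_sum]
  rw [List.sum_toFinset_count_eq_length]

lemma containment_iff (la lb : List Char) :
    (∀ k ∈ (PySem.Set.ofList lb : List Char), lb.count k ≤ la.count k)
      ↔ (lb : Multiset Char) ≤ (la : Multiset Char) := by
  rw [Multiset.le_iff_count]
  constructor
  · intro h d
    rw [Multiset.coe_count, Multiset.coe_count]
    by_cases hd : d ∈ lb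
    · exact h d (by rw [PySem.Set.mem_ofList]; exact hd)
    · simp [List.count_eq_zero_of_not_mem hd]
  · intro h k _
    have := h k
    rw [Multiset.coe_count, Multiset.coe_count] at this
    exact this

-- ===== VERDICT (by name: the statement is the Claim_ definition above) =====
theorem solve_spec : Claim_equal_solve := by
  intro a b _
  unfold Spec_solve solve solve_alt
  have hsa := PySem.List.sorted_pairwise a.toList (fun c => c)
  have hsb := PySem.List.sorted_pairwise b.toList (fun c => c)
  have hpa : (PySem.List.sorted a.toList (fun c => c) false).Perm a.toList :=
    PySem.List.sorted_perm a.toList (fun c => c) false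
  have hpb : (PySem.List.sorted b.toList (fun c => c) false).Perm b.toList :=
    PySem.List.sorted_perm b.toList (fun c => c) false
  have hmul : ((PySem.List.sorted b.toList (fun c => c) false : List Char) : Multiset Char)
        ≤ ((PySem.List.sorted a.toList (fun c => c) false : List Char) : Multiset Char)
      ↔ ((b.toList : Multiset Char) ≤ (a.toList : Multiset Char)) := by
    rw [Multiset.coe_eq_coe.mpr hpa, Multiset.coe_eq_coe.mpr hpb]
  rw [PySem.Dict.items_counter]
  rw [solveLoop_spec a.toList b.toList _ 0 _ (fun k hk => by
    rw [List.one_le_count_iff]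
    exact (PySem.Set.mem_ofList _ _).mp hk)]
  rw [sum_counts]
  simp only [PySem.Str.len_eq]
  have hchk := chk_iff (PySem.List.sorted a.toList (fun c => c) false)
    (PySem.List.sorted b.toList (fun c => c) false) hsa hsb
  by_cases hc : (b.toList : Multiset Char) ≤ (a.toList : Multiset Char)
  · have hlen : b.toList.length ≤ a.toList.length := by
      simpa using Multiset.card_le_card hc
    rw [if_neg (by omega)]
    rw [if_pos ((containment_iff a.toList b.toList).mpr hc)]
    rw [if_pos (hchk.mpr (hmul.mpr hc))]
    ring
  · by_cases hlen : (b.toList.length : Int) > a.toList.length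
    · rw [if_pos hlen]
      rw [if_neg]
      intro hchk'
      exact hc (hmul.mp (hchk.mp hchk'))
    · rw [if_neg hlen]
      rw [if_neg (fun h => hc ((containment_iff a.toList b.toList).mp h))]
      rw [if_neg (fun h => hc (hmul.mp (hchk.mp h)))]
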